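-- pv_equiv track=rewrite | github.com/tatiannaKirpichenko/AQA-Python | Lesson2/tasks/src/sum_ex.py | sum_unless0
-- ===== SOURCE A (Python) =====
-- def sum_unless0(numbers):
--     if len(numbers) < 2:
--         raise Exception('Недостаточно слагаемых')
--
--     s = 0
--
--     for n in numbers:
--         if n == 0:
--             break
--
--         s += n
--
--     return s
-- ===== SOURCE B (Python) =====
-- def sum_unless0(numbers):
--     if len(numbers) < 2:
--         raise Exception('Недостаточно слагаемых')
--     try:
--         idx = numbers.index(0)
--     except ValueError:
--         idx = len(numbers)
--     return sum(numbers[:idx])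
-- ===== Notes on version B (the rewrite author's own statement) =====
-- stated objective: alternative
-- what changed: Replaces the accumulate-and-break loop with a locate-then-reduce decomposition: find the index of the first zero (or the length if none), then sum the slice before it.
import Mathlib
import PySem

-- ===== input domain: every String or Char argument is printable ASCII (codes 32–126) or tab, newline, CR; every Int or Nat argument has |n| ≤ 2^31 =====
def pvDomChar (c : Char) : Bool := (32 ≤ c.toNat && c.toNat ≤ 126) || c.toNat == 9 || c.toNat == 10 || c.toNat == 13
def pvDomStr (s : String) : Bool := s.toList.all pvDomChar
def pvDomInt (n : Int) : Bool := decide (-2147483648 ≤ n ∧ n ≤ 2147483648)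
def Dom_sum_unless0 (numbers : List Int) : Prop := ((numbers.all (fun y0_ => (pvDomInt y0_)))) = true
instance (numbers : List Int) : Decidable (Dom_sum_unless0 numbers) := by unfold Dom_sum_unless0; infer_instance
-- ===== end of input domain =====

-- B replaces A's accumulate-and-break loop by locating the first zero's index and summing the slice before it (alternative decomposition, same O(n) cost); both raise on len < 2 (excluded by Pre_).


-- ===== PORT A =====
-- loop 'for n in numbers: if n == 0: break; s += n' as structural recursion over the list
def sumLoopA : List Int → Int → Int
  | [], s => s
  | n :: rest, s => if n == 0 then s else sumLoopA rest (s + n)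

def sum_unless0 (numbers : List Int) : Int := sumLoopA numbers 0

-- ===== PORT B =====
-- idx = numbers.index(0) (or len on ValueError); sum(numbers[:idx])
def sum_unless0_alt (numbers : List Int) : Int :=
  let idx : Nat := match PySem.List.index? numbers 0 with
    | some i => i
    | none => numbers.length
  (PySem.List.slice numbers none (some (idx : Int))).sum

-- ===== PRECONDITION & SPEC =====
-- A (and B) raise Exception('Недостаточно слагаемых') when len(numbers) < 2
def Pre_sum_unless0 (numbers : List Int) : Prop := 2 ≤ numbers.length
instance (numbers : List Int) : Decidable (Pre_sum_unless0 numbers) := by unfold Pre_sum_unless0; infer_instance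
def pvWitness_sum_unless0 : List Int := [1, 2]
def Spec_sum_unless0 (numbers : List Int) (out : Int) : Prop := out = sum_unless0_alt numbers
instance (numbers : List Int) (out : Int) : Decidable (Spec_sum_unless0 numbers out) := by unfold Spec_sum_unless0; infer_instance

-- ===== CLAIM (what is proved, stated in full; the proofs are below) =====
def Claim_equal_sum_unless0 : Prop := ∀ (numbers : List Int), Dom_sum_unless0 numbers → Pre_sum_unless0 numbers → Spec_sum_unless0 numbers (sum_unless0 numbers)

-- ===== LEMMAS AND PROOFS =====

theorem sumLoopA_acc (xs : List Int) (s : Int) : sumLoopA xs s = s + sumLoopA xs 0 := by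
  induction xs generalizing s with
  | nil => simp [sumLoopA]
  | cons n rest ih =>
    by_cases h : n = 0
    · simp [sumLoopA, h]
    · simp only [sumLoopA, beq_iff_eq, h, if_false]
      rw [ih (s + n), ih (0 + n)]
      ring

theorem a_char (xs : List Int) :
    sum_unless0 xs = (xs.takeWhile (fun n => !(n == 0))).sum := by
  induction xs with
  | nil => simp [sum_unless0, sumLoopA]
  | cons n rest ih =>
    by_cases h : n = 0
    · subst h
      show sumLoopA (0 :: rest) 0 = _
      simp [sumLoopA, List.takeWhile]
    · show sumLoopA (n :: rest) 0 = _
      rw [List.takeWhile_cons_of_pos (by simp [h])]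
      simp only [sumLoopA, beq_iff_eq, h, if_false, List.sum_cons]
      rw [sumLoopA_acc, show sumLoopA rest 0 = sum_unless0 rest from rfl, ih]
      ring

theorem tw_pre (pre suf : List Int) (hp : (0:Int) ∉ pre) :
    (pre ++ 0 :: suf).takeWhile (fun n => !(n == 0)) = pre := by
  induction pre with
  | nil => simp
  | cons x xs ih =>
    simp only [List.mem_cons, not_or] at hp
    simp only [List.cons_append, List.takeWhile]
    have hx : (x == (0:Int)) = false := beq_eq_false_iff_ne.2 (fun hc => hp.1 hc.symm)
    simp [hx, ih hp.2]

theorem b_char (xs : List Int) :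
    sum_unless0_alt xs = (xs.takeWhile (fun n => !(n == 0))).sum := by
  unfold sum_unless0_alt
  cases h : PySem.List.index? xs 0 with
  | none =>
    have h0 : (0:Int) ∉ xs := (PySem.List.index?_eq_none_iff xs 0).1 h
    show (PySem.List.slice xs none (some ((xs.length : Nat) : Int))).sum = _
    rw [show ((xs.length : Int)) = ((xs.length : Nat) : Int) from rfl,
        PySem.List.slice_to_natCast]
    simp only [List.take_length]
    rw [List.takeWhile_eq_self_iff.2 (by intro a ha; simp; exact fun hc => h0 (hc ▸ ha))]
  | some k =>
    obtain ⟨pre, suf, hxs, hlen, hnp⟩ := (PySem.List.index?_eq_some_iff xs 0 k).1 h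
    show (PySem.List.slice xs none (some ((k : Nat) : Int))).sum = _
    rw [PySem.List.slice_to_natCast]
    subst hxs
    rw [tw_pre pre suf hnp, ← hlen, List.take_left]

theorem both_eq (xs : List Int) : sum_unless0 xs = sum_unless0_alt xs := by
  rw [a_char, b_char]

-- ===== VERDICT (by name: the statement is the Claim_ definition above) =====
theorem sum_unless0_spec : Claim_equal_sum_unless0 := by
  intro numbers _ _
  unfold Spec_sum_unless0
  exact both_eq numbers
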